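-- pv_equiv track=rewrite | github.com/TheMightyJew/EA_Project | Calcudoku.py | get_min_max_by_indexes
-- ===== SOURCE A (Python) =====
-- def get_min_max_by_indexes(board, indexes_list):
--     max_num = None
--     min_num = None
--     for index in indexes_list:
--         value = board[index]
--         if max_num is None or min_num is None:
--             min_num = value
--             max_num = value
--         else:
--             min_num = min(min_num, value)
--             max_num = max(max_num, value)
--     return min_num, max_num
-- ===== SOURCE B (Python) =====
-- def get_min_max_by_indexes(board, indexes_list):
--     values = [board[i] for i in indexes_list]
--     if not values:
--         return None, None
--     return min(values), max(values)
-- ===== Notes on version B (the rewrite author's own statement) =====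
-- stated objective: simpler
-- what changed: Replaces the single-pass running min/max accumulator loop (with its None-sentinel branch) by materializing the selected values with a comprehension and taking min()/max() in two library scans, returning (None, None) only for an empty selection.
import Mathlib
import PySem

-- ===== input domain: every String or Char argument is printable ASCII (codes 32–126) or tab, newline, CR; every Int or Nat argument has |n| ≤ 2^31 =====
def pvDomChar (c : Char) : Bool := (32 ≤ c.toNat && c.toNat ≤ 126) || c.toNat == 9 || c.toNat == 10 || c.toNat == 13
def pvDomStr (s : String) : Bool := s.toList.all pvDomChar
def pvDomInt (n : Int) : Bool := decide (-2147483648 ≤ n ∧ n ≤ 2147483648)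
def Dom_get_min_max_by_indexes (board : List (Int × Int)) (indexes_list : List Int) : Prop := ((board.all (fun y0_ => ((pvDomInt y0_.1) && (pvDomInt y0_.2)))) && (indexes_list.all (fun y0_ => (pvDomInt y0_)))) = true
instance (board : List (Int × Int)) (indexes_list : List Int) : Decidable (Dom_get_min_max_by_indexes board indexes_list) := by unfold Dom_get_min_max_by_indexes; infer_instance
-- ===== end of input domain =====

-- B trades A's single-pass running min/max accumulator (with its None-sentinel branch)
-- for materializing the selected values and two library min/max scans (objective: simpler).

-- shared helper: Python dict lookup board[index] on the association list (first match);
-- returns none exactly where Python raises KeyError (excluded by Pre_)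
def pvLookup (board : List (Int × Int)) (k : Int) : Option Int :=
  (board.find? (fun p => p.1 == k)).map (·.2)

-- ===== PORT A =====
def get_min_max_by_indexes (board : List (Int × Int)) (indexes_list : List Int) : Option Int × Option Int :=
  indexes_list.foldl (fun (st : Option Int × Option Int) index =>
    -- value = board[index]; getD 0 never fires inside Pre_ (lookup succeeds there)
    let value := (pvLookup board index).getD 0
    match st with
    | (some mn, some mx) => (some (min mn value), some (max mx value))
    | _ => (some value, some value)) (none, none)

-- ===== PORT B =====
def get_min_max_by_indexes_alt (board : List (Int × Int)) (indexes_list : List Int) : Option Int × Option Int :=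
  let values := indexes_list.map (fun i => (pvLookup board i).getD 0)
  if values.isEmpty then (none, none)
  else (PySem.List.min? values (fun x => x), PySem.List.max? values (fun x => x))

-- ===== PRECONDITION & SPEC =====
-- Pre_ excludes exactly the inputs where board[index] raises KeyError in A (index not a key of board)
def Pre_get_min_max_by_indexes (board : List (Int × Int)) (indexes_list : List Int) : Prop :=
  ∀ i ∈ indexes_list, i ∈ board.map (·.1)
instance (board : List (Int × Int)) (indexes_list : List Int) : Decidable (Pre_get_min_max_by_indexes board indexes_list) := by unfold Pre_get_min_max_by_indexes; infer_instance
def pvWitness_get_min_max_by_indexes : (List (Int × Int)) × List Int := ([(0, 4), (1, -2), (2, 7)], [1, 0, 1, 2])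

def Spec_get_min_max_by_indexes (board : List (Int × Int)) (indexes_list : List Int) (out : Option Int × Option Int) : Prop := out = get_min_max_by_indexes_alt board indexes_list
instance (board : List (Int × Int)) (indexes_list : List Int) (out : Option Int × Option Int) : Decidable (Spec_get_min_max_by_indexes board indexes_list out) := by unfold Spec_get_min_max_by_indexes; infer_instance

-- ===== CLAIM (what is proved, stated in full; the proofs are below) =====
def Claim_equal_get_min_max_by_indexes : Prop := ∀ (board : List (Int × Int)) (indexes_list : List Int), Dom_get_min_max_by_indexes board indexes_list → Pre_get_min_max_by_indexes board indexes_list → Spec_get_min_max_by_indexes board indexes_list (get_min_max_by_indexes board indexes_list)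

-- ===== LEMMAS AND PROOFS =====

-- A's loop from a fully-initialised state is the pair of running folds
theorem pvLoopA (vs : List Int) (m M : Int) :
    vs.foldl (fun (st : Option Int × Option Int) v =>
      match st with
      | (some mn, some mx) => (some (min mn v), some (max mx v))
      | _ => (some v, some v)) (some m, some M)
    = (some (vs.foldl min m), some (vs.foldl max M)) := by
  induction vs generalizing m M with
  | nil => rfl
  | cons v t ih => simp [List.foldl, ih]

-- ===== VERDICT =====
theorem get_min_max_by_indexes_spec : Claim_equal_get_min_max_by_indexes := by
  intro board indexes_list _ _
  unfold Spec_get_min_max_by_indexes get_min_max_by_indexes get_min_max_by_indexes_alt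
  cases h : indexes_list.map (fun i => (pvLookup board i).getD 0) with
  | nil =>
    have : indexes_list = [] := by
      cases indexes_list with
      | nil => rfl
      | cons a t => simp at h
    subst this; rfl
  | cons v t =>
    cases indexes_list with
    | nil => simp at h
    | cons a rest =>
      simp only [List.map_cons, List.cons.injEq] at h
      obtain ⟨hv, ht⟩ := h
      have : (a :: rest).foldl (fun (st : Option Int × Option Int) index =>
          let value := (pvLookup board index).getD 0
          match st with
          | (some mn, some mx) => (some (min mn value), some (max mx value))
          | _ => (some value, some value)) (none, none)
          = (some (t.foldl min v), some (t.foldl max v)) := by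
        simp only [List.foldl]
        have hmap : rest.foldl (fun (st : Option Int × Option Int) index =>
            let value := (pvLookup board index).getD 0
            match st with
            | (some mn, some mx) => (some (min mn value), some (max mx value))
            | _ => (some value, some value))
            (some ((pvLookup board a).getD 0), some ((pvLookup board a).getD 0))
            = (rest.map (fun i => (pvLookup board i).getD 0)).foldl (fun (st : Option Int × Option Int) v =>
              match st with
              | (some mn, some mx) => (some (min mn v), some (max mx v))
              | _ => (some v, some v))
              (some ((pvLookup board a).getD 0), some ((pvLookup board a).getD 0)) := by
          rw [List.foldl_map]
        rw [hmap, ht, hv, pvLoopA]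
      rw [this]
      simp [PySem.List.min?_id_cons, PySem.List.max?_id_cons]
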